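-- pv_equiv track=rewrite | github.com/MrBrantCode/unitest_baseline | mut_generate/mist_train_taco/taco_540/solution.py | count_trailing_zeros_of_f
-- ===== SOURCE A (Python) =====
-- def count_trailing_zeros_of_f(n: int) -> int:
--     """
--     Calculate the number of trailing zeros in the decimal notation of f(n).
--
--     Parameters:
--     n (int): The integer input for which to calculate the number of trailing zeros in f(n).
--
--     Returns:
--     int: The number of trailing zeros in the decimal notation of f(n).
--     """
--     if n % 2 == 1:
--         return 0
--
--     A = 0
--     add = 10
--     while n >= add:
--         A += n // add
--         add *= 5
--
--     return A
-- ===== SOURCE B (Python) =====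
-- def count_trailing_zeros_of_f(n: int) -> int:
--     if n % 2 == 1:
--         return 0
--     m = n // 2
--     if m <= 0:
--         return 0
--     # Legendre: v5(m!) = (m - digit_sum_base5(m)) / 4
--     s = 0
--     t = m
--     while t > 0:
--         s += t % 5
--         t //= 5
--     return (m - s) // 4
-- ===== Notes on version B (the rewrite author's own statement) =====
-- stated objective: alternative
-- what changed: Replaces A's while loop that sums n//add over the growing divisors add=10,50,250,... by Legendre's closed form on the even half m: a base-five digit-sum loop followed by one exact division by four.
import Mathlib
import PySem

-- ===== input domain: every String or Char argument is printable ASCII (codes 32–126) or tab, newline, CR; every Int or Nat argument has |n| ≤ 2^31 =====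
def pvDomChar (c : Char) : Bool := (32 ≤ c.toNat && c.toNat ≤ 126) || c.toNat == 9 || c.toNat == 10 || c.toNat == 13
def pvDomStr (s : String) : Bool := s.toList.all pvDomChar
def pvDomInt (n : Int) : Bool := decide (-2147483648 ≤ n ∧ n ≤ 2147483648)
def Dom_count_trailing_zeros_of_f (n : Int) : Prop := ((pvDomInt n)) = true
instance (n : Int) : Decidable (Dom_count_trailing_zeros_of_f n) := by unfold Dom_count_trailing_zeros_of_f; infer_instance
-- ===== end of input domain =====

-- B replaces A's loop over growing divisors by Legendre's closed form (base-five digit sum) on m = n//2; alternative algorithm, same cost.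


-- ===== PORT A =====
-- A's while loop; the state 'add' (10, then *5 each pass) is carried as the exponent k with add = 10 * 5^k.
def pvLoopA (n : Int) (k : Nat) (acc : Int) : Int :=
  if n ≥ 10 * 5 ^ k then pvLoopA n (k + 1) (acc + PySem.Int.floordiv n (10 * 5 ^ k)) else acc
termination_by (n + 1 - 10 * 5 ^ k).toNat
decreasing_by
  have h1 : (1:Int) ≤ 5 ^ k := one_le_pow₀ (by norm_num)
  omega

def count_trailing_zeros_of_f (n : Int) : Int :=
  if PySem.Int.mod n 2 == 1 then 0 else pvLoopA n 0 0

-- ===== PORT B =====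
-- B's digit-sum loop: while t > 0: s += t % 5; t //= 5
def pvDigits5 (t s : Int) : Int :=
  if 0 < t then pvDigits5 (PySem.Int.floordiv t 5) (s + PySem.Int.mod t 5) else s
termination_by t.toNat
decreasing_by
  rw [PySem.Int.floordiv_eq_ediv_of_pos (by norm_num)]
  omega

def count_trailing_zeros_of_f_alt (n : Int) : Int :=
  if PySem.Int.mod n 2 == 1 then 0
  else
    let m := PySem.Int.floordiv n 2
    if m ≤ 0 then 0
    else PySem.Int.floordiv (m - pvDigits5 m 0) 4

-- ===== PRECONDITION & SPEC =====
def Spec_count_trailing_zeros_of_f (n : Int) (out : Int) : Prop := out = count_trailing_zeros_of_f_alt n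
instance (n : Int) (out : Int) : Decidable (Spec_count_trailing_zeros_of_f n out) := by unfold Spec_count_trailing_zeros_of_f; infer_instance

-- ===== CLAIM (what is proved, stated in full; the proofs are below) =====
def Claim_equal_count_trailing_zeros_of_f : Prop := ∀ (n : Int), Dom_count_trailing_zeros_of_f n → Spec_count_trailing_zeros_of_f n (count_trailing_zeros_of_f n)

-- ===== LEMMAS AND PROOFS =====

-- math layer: legN m t = m/t + m/(5t) + m/(25t) + …  (Nat)
def legN (m t : Nat) : Nat :=
  if t ≤ m ∧ 0 < t then m / t + legN m (5 * t) else 0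
termination_by m + 1 - t
decreasing_by omega

-- base-5 digit sum (Nat)
def s5 (m : Nat) : Nat :=
  if 0 < m then m % 5 + s5 (m / 5) else 0
termination_by m
decreasing_by omega

theorem legShift (m t : Nat) (ht : 0 < t) : legN m (5 * t) = legN (m / 5) t := by
  have hc : (5 * t ≤ m ∧ 0 < 5 * t) ↔ (t ≤ m / 5 ∧ 0 < t) := by
    constructor
    · intro h; exact ⟨Nat.le_div_iff_mul_le (by norm_num) |>.mpr (by omega), ht⟩
    · intro h
      have := Nat.le_div_iff_mul_le (k := 5) (by norm_num) |>.mp h.1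
      exact ⟨by omega, by omega⟩
  conv_lhs => rw [legN]
  conv_rhs => rw [legN]
  by_cases h : 5 * t ≤ m ∧ 0 < 5 * t
  · rw [if_pos h, if_pos (hc.mp h), legShift m (5 * t) (by omega),
      Nat.div_div_eq_div_mul]
  · rw [if_neg h, if_neg (fun hh => h (hc.mpr hh))]
termination_by m + 1 - t
decreasing_by omega

theorem legendre (m : Nat) : 4 * legN m 5 + s5 m = m := by
  by_cases h5 : 5 ≤ m
  · have hq : m / 5 < m := Nat.div_lt_self (by omega) (by norm_num)
    have ih := legendre (m / 5)
    have hsh : legN m (5 * 5) = legN (m / 5) 5 := legShift m 5 (by norm_num)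
    rw [legN, if_pos ⟨h5, by norm_num⟩, hsh, s5, if_pos (by omega)]
    have := Nat.div_add_mod m 5
    omega
  · rw [legN, if_neg (by omega), s5]
    split_ifs with h0
    · have hz : m / 5 = 0 := Nat.div_eq_of_lt (by omega)
      rw [hz, s5]
      simp
      omega
    · omega
termination_by m
decreasing_by omega

-- A's loop computes legN on m = n // 2 (n = 2*m even)
theorem loopA_eq (m k : Nat) (acc : Int) :
    pvLoopA (2 * (m : Int)) k acc = acc + (legN m (5 ^ (k + 1)) : Int) := by
  have hp : 0 < 5 ^ (k + 1) := pow_pos (by norm_num) _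
  have hcast : (10 : Int) * 5 ^ k = ((2 * 5 ^ (k + 1) : Nat) : Int) := by
    push_cast [pow_succ]; ring
  conv_lhs => rw [pvLoopA]
  conv_rhs => rw [legN]
  by_cases h : 5 ^ (k + 1) ≤ m
  · have hcond : 2 * (m : Int) ≥ 10 * 5 ^ k := by
      rw [hcast]; exact_mod_cast (by omega : 2 * 5 ^ (k + 1) ≤ 2 * m)
    have hdiv : PySem.Int.floordiv (2 * (m : Int)) (10 * 5 ^ k)
        = ((m / 5 ^ (k + 1) : Nat) : Int) := by
      rw [hcast, show 2 * (m : Int) = ((2 * m : Nat) : Int) by push_cast; ring,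
        PySem.Int.floordiv_natCast, Nat.mul_div_mul_left _ _ (by norm_num)]
    rw [if_pos hcond, if_pos ⟨h, hp⟩, hdiv, loopA_eq m (k + 1) _]
    have : 5 * 5 ^ (k + 1) = 5 ^ (k + 1 + 1) := by ring
    rw [this]
    push_cast
    ring
  · have hcond : ¬ (2 * (m : Int) ≥ 10 * 5 ^ k) := by
      rw [hcast]
      intro hh
      have h2 : 2 * 5 ^ (k + 1) ≤ 2 * m := by exact_mod_cast hh
      exact h (by omega)
    rw [if_neg hcond, if_neg (by tauto)]
    simp
termination_by m + 1 - 5 ^ (k + 1)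
decreasing_by
  omega

-- B's loop computes s5
theorem digits5_eq (m : Nat) (s : Int) : pvDigits5 (m : Int) s = s + (s5 m : Int) := by
  conv_lhs => rw [pvDigits5]
  conv_rhs => rw [s5]
  by_cases h : 0 < m
  · rw [if_pos (by exact_mod_cast h),
      show (5 : Int) = ((5 : Nat) : Int) from rfl,
      PySem.Int.floordiv_natCast, PySem.Int.mod_natCast,
      digits5_eq (m / 5) _, if_pos h]
    push_cast
    ring
  · rw [if_neg (show ¬ (0:Int) < (m : Int) by exact_mod_cast h), if_neg h]
    simp
termination_by m
decreasing_by omega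

-- ===== VERDICT (by name: the statement is the Claim_ definition above) =====
theorem count_trailing_zeros_of_f_spec : Claim_equal_count_trailing_zeros_of_f := by
  intro n _
  unfold Spec_count_trailing_zeros_of_f count_trailing_zeros_of_f count_trailing_zeros_of_f_alt
  by_cases hodd : PySem.Int.mod n 2 == 1
  · rw [if_pos hodd, if_pos hodd]
  · rw [if_neg hodd, if_neg hodd]
    have hmod : PySem.Int.mod n 2 = n % 2 := PySem.Int.mod_eq_emod_of_pos (by norm_num)
    have hne : PySem.Int.mod n 2 ≠ 1 := by simpa using hodd
    have heven : n % 2 = 0 := by omega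
    have hfd : PySem.Int.floordiv n 2 = n / 2 := PySem.Int.floordiv_eq_ediv_of_pos (by norm_num)
    by_cases hm : PySem.Int.floordiv n 2 ≤ 0
    · rw [if_pos hm]
      rw [pvLoopA, if_neg (by rw [hfd] at hm; simp only [pow_zero, mul_one]; omega)]
    · rw [if_neg hm]
      rw [hfd] at hm ⊢
      obtain ⟨M, hM⟩ : ∃ M : Nat, n / 2 = (M : Int) := ⟨(n / 2).toNat, by omega⟩
      rw [hM] at hm ⊢
      have hn2 : n = 2 * (M : Int) := by omega
      rw [hn2, loopA_eq M 0 0, digits5_eq M 0,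
        PySem.Int.floordiv_eq_ediv_of_pos (by norm_num)]
      have hleg := legendre M
      simp only [pow_one, zero_add]
      omega
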